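-- pv_equiv track=rewrite | github.com/18PatZ/Voronoi-Stylization | stylizeUtils.py | topBottomTriVert
-- ===== SOURCE A (Python) =====
-- def topBottomTriVert(vertices):
--     v = None
--     ind = 0
--
--     vT = None
--     indT = 0
--
--     for i in range(len(vertices)):
--         if v is None or vertices[i][1] < v[1]:
--             v = vertices[i]
--             ind = i
--         if vT is None or vertices[i][1] > vT[1]:
--             vT = vertices[i]
--             indT = i
--     return v, ind, vT, indT
-- ===== SOURCE B (Python) =====
-- def topBottomTriVert(vertices):
--     ind = min(range(len(vertices)), key=lambda i: vertices[i][1])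
--     indT = max(range(len(vertices)), key=lambda i: vertices[i][1])
--     return vertices[ind], ind, vertices[indT], indT
-- ===== Notes on version B (the rewrite author's own statement) =====
-- stated objective: idiomatic
-- what changed: Replaces the single manual scan carrying two Optional running extrema with two built-in keyed scans: ind = min(range(len(vertices)), key=...) and indT = max(...), relying on min/max returning the first extremal index to preserve A's first-occurrence tie-breaking.
-- outside the precondition, e.g. on topBottomTriVert([]): A returns (None, 0, None, 0), B raises ValueError
import Mathlib
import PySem

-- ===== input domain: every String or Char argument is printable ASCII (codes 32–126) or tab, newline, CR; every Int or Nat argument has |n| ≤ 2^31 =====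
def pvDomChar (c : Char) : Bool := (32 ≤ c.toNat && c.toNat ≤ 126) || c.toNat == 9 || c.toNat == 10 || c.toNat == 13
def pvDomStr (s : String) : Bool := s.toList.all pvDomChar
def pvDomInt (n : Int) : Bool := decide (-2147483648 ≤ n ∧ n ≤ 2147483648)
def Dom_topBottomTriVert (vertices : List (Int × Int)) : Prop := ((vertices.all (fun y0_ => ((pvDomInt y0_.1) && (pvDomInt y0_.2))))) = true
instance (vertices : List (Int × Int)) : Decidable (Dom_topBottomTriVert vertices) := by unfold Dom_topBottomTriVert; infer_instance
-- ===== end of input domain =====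

-- B replaces A's single manual scan (two Optional running extrema) with two built-in
-- first-extremal keyed scans (min/max over the index range); same O(n) cost, more idiomatic.

-- ===== PORT A =====
-- the running (v, ind) update: 'if v is None or vertices[i][1] < v[1]: v, ind = vertices[i], i'
def pvStepLo (vertices : List (Int × Int)) (st : Option (Int × Int) × Int) (i : Int) :
    Option (Int × Int) × Int :=
  match st.1 with
  | none => (some (PySem.List.pyGetD vertices i (0, 0)), i)
  | some v =>
      if (PySem.List.pyGetD vertices i (0, 0)).2 < v.2 then
        (some (PySem.List.pyGetD vertices i (0, 0)), i)
      else st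

-- the running (vT, indT) update: 'if vT is None or vertices[i][1] > vT[1]: vT, indT = vertices[i], i'
def pvStepHi (vertices : List (Int × Int)) (st : Option (Int × Int) × Int) (i : Int) :
    Option (Int × Int) × Int :=
  match st.1 with
  | none => (some (PySem.List.pyGetD vertices i (0, 0)), i)
  | some vT =>
      if vT.2 < (PySem.List.pyGetD vertices i (0, 0)).2 then
        (some (PySem.List.pyGetD vertices i (0, 0)), i)
      else st

-- the final 'return v, ind, vT, indT' of A (None only on the empty input, which is outside Pre_)
def pvReturnA (r : (Option (Int × Int) × Int) × (Option (Int × Int) × Int)) :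
    (Int × Int) × Int × (Int × Int) × Int :=
  match r with
  | ((some v, ind), (some vT, indT)) => (v, ind, vT, indT)
  | _ => ((0, 0), 0, (0, 0), 0)   -- empty input: Python A returns (None, 0, None, 0), not of the declared type; outside Pre_

def topBottomTriVert (vertices : List (Int × Int)) : (Int × Int) × Int × (Int × Int) × Int :=
  pvReturnA ((PySem.List.pyRange 0 (vertices.length : Int) 1).foldl
    (fun st i => (pvStepLo vertices st.1 i, pvStepHi vertices st.2 i))
    ((none, 0), (none, 0)))

-- ===== PORT B =====
-- 'min(range(len(vertices)), key=...)' / 'max(...)': none only for empty input, where Python B raises ValueError (outside Pre_)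
def pvReturnB (vertices : List (Int × Int)) (oMin oMax : Option Int) :
    (Int × Int) × Int × (Int × Int) × Int :=
  match oMin, oMax with
  | some ind, some indT =>
      (PySem.List.pyGetD vertices ind (0, 0), ind, PySem.List.pyGetD vertices indT (0, 0), indT)
  | _, _ => ((0, 0), 0, (0, 0), 0)

def topBottomTriVert_alt (vertices : List (Int × Int)) : (Int × Int) × Int × (Int × Int) × Int :=
  pvReturnB vertices
    (PySem.List.min? (PySem.List.pyRange 0 (vertices.length : Int) 1)
      (fun i => (PySem.List.pyGetD vertices i (0, 0)).2))
    (PySem.List.max? (PySem.List.pyRange 0 (vertices.length : Int) 1)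
      (fun i => (PySem.List.pyGetD vertices i (0, 0)).2))

-- ===== PRECONDITION & SPEC =====
-- Pre_ excludes the empty list, on which A returns (None, 0, None, 0) — None is not a value
-- of the declared (Int × Int) type — and B raises ValueError.
def Pre_topBottomTriVert (vertices : List (Int × Int)) : Prop := vertices ≠ []
instance (vertices : List (Int × Int)) : Decidable (Pre_topBottomTriVert vertices) := by
  unfold Pre_topBottomTriVert; infer_instance

def pvWitness_topBottomTriVert : (List (Int × Int)) := [(0, 1), (2, 3), (4, 1)]

def Spec_topBottomTriVert (vertices : List (Int × Int)) (out : (Int × Int) × Int × (Int × Int) × Int) : Prop := out = topBottomTriVert_alt vertices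
instance (vertices : List (Int × Int)) (out : (Int × Int) × Int × (Int × Int) × Int) : Decidable (Spec_topBottomTriVert vertices out) := by unfold Spec_topBottomTriVert; infer_instance

-- ===== CLAIM (what is proved, stated in full; the proofs are below) =====
def Claim_equal_topBottomTriVert : Prop := ∀ (vertices : List (Int × Int)), Dom_topBottomTriVert vertices → Pre_topBottomTriVert vertices → Spec_topBottomTriVert vertices (topBottomTriVert vertices)

-- ===== LEMMAS AND PROOFS =====

-- the index-accumulating step hidden inside PySem.List.min? with key i ↦ vertices[i][1]
def pvStepMin (vertices : List (Int × Int)) (acc : Option Int) (x : Int) : Option Int :=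
  match acc with
  | none => some x
  | some m =>
      if (PySem.List.pyGetD vertices x (0, 0)).2 < (PySem.List.pyGetD vertices m (0, 0)).2 then
        some x
      else some m

def pvStepMax (vertices : List (Int × Int)) (acc : Option Int) (x : Int) : Option Int :=
  match acc with
  | none => some x
  | some m =>
      if (PySem.List.pyGetD vertices m (0, 0)).2 < (PySem.List.pyGetD vertices x (0, 0)).2 then
        some x
      else some m

lemma min?_eq_foldl_stepMin (vertices : List (Int × Int)) (l : List Int) :
    PySem.List.min? l (fun i => (PySem.List.pyGetD vertices i (0, 0)).2)
      = l.foldl (pvStepMin vertices) none := by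
  unfold PySem.List.min?
  congr 1
  funext acc x
  cases acc <;> rfl

lemma max?_eq_foldl_stepMax (vertices : List (Int × Int)) (l : List Int) :
    PySem.List.max? l (fun i => (PySem.List.pyGetD vertices i (0, 0)).2)
      = l.foldl (pvStepMax vertices) none := by
  unfold PySem.List.max?
  congr 1
  funext acc x
  cases acc <;> rfl

lemma foldl_pair {α β γ : Type} (f : α → γ → α) (h : β → γ → β) (l : List γ) (a : α) (b : β) :
    l.foldl (fun st x => (f st.1 x, h st.2 x)) (a, b) = (l.foldl f a, l.foldl h b) := by
  induction l generalizing a b with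
  | nil => rfl
  | cons x t ih => simpa using ih (f a x) (h b x)

-- A's running-min pair state tracks exactly the index accumulated by pvStepMin
lemma lo_inv (vertices : List (Int × Int)) (l : List Int) (o : Option Int) (j : Int) :
    l.foldl (pvStepLo vertices) (o.map (fun i => PySem.List.pyGetD vertices i (0, 0)), o.getD j)
      = ((l.foldl (pvStepMin vertices) o).map (fun i => PySem.List.pyGetD vertices i (0, 0)),
         (l.foldl (pvStepMin vertices) o).getD j) := by
  induction l generalizing o j with
  | nil => rfl
  | cons x t ih =>
    cases o with
    | none =>
        simpa [pvStepLo, pvStepMin] using ih (some x) j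
    | some m =>
        simp only [List.foldl_cons, pvStepLo, pvStepMin, Option.map_some, Option.getD_some]
        split_ifs with h
        · simpa using ih (some x) j
        · simpa using ih (some m) j

lemma hi_inv (vertices : List (Int × Int)) (l : List Int) (o : Option Int) (j : Int) :
    l.foldl (pvStepHi vertices) (o.map (fun i => PySem.List.pyGetD vertices i (0, 0)), o.getD j)
      = ((l.foldl (pvStepMax vertices) o).map (fun i => PySem.List.pyGetD vertices i (0, 0)),
         (l.foldl (pvStepMax vertices) o).getD j) := by
  induction l generalizing o j with
  | nil => rfl
  | cons x t ih =>
    cases o with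
    | none =>
        simpa [pvStepHi, pvStepMax] using ih (some x) j
    | some m =>
        simp only [List.foldl_cons, pvStepHi, pvStepMax, Option.map_some, Option.getD_some]
        split_ifs with h
        · simpa using ih (some x) j
        · simpa using ih (some m) j

-- ===== VERDICT (by name: the statement is the Claim_ definition above) =====
theorem topBottomTriVert_spec : Claim_equal_topBottomTriVert := by
  intro vertices _ hpre
  unfold Spec_topBottomTriVert topBottomTriVert topBottomTriVert_alt
  have hne : PySem.List.pyRange 0 (vertices.length : Int) 1 ≠ [] := by
    intro h
    have := congrArg List.length h
    rw [PySem.List.length_pyRange_one] at this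
    simp at this
    exact hpre this
  set l := PySem.List.pyRange 0 (vertices.length : Int) 1 with hl
  have hfold :
      l.foldl (fun st i => (pvStepLo vertices st.1 i, pvStepHi vertices st.2 i))
        ((none, 0), (none, 0))
      = ((l.foldl (pvStepLo vertices) (none, 0)), (l.foldl (pvStepHi vertices) (none, 0))) :=
    foldl_pair (pvStepLo vertices) (pvStepHi vertices) l (none, 0) (none, 0)
  have hlo := lo_inv vertices l none 0
  have hhi := hi_inv vertices l none 0
  simp only [Option.map_none, Option.getD_none] at hlo hhi
  rw [min?_eq_foldl_stepMin, max?_eq_foldl_stepMax]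
  obtain ⟨mi, hmi⟩ : ∃ mi, l.foldl (pvStepMin vertices) none = some mi := by
    have := PySem.List.min?_eq_none_iff (xs := l)
        (key := fun i => (PySem.List.pyGetD vertices i (0, 0)).2)
    rw [min?_eq_foldl_stepMin] at this
    cases h : l.foldl (pvStepMin vertices) none with
    | none => exact absurd (this.mp h) hne
    | some m => exact ⟨m, rfl⟩
  obtain ⟨ma, hma⟩ : ∃ ma, l.foldl (pvStepMax vertices) none = some ma := by
    have := PySem.List.max?_eq_none_iff (xs := l)
        (key := fun i => (PySem.List.pyGetD vertices i (0, 0)).2)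
    rw [max?_eq_foldl_stepMax] at this
    cases h : l.foldl (pvStepMax vertices) none with
    | none => exact absurd (this.mp h) hne
    | some m => exact ⟨m, rfl⟩
  rw [hmi, hma, hfold, hlo, hhi, hmi, hma]
  simp [pvReturnA, pvReturnB]
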